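-- pv_equiv track=rewrite | github.com/jbcnrlz/biometricprocessing | generateCrossValidation.py | getBaseGallery
-- ===== SOURCE A (Python) =====
-- def getBaseGallery(dataFaces,classesFaces):
--     returnBaseGallery = {}
--     restOfData = []
--     classesRestOfData = []
--     for d in range(len(classesFaces)):
--         currClass = classesFaces[d]
--         if not currClass in returnBaseGallery.keys():
--             returnBaseGallery[currClass] = dataFaces[d]
--         else:
--             classesRestOfData.append(currClass)
--             restOfData.append(dataFaces[d])
--
--     return list(returnBaseGallery.values()), list(returnBaseGallery.keys()), restOfData, classesRestOfData
-- ===== SOURCE B (Python) =====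
-- def getBaseGallery(dataFaces, classesFaces):
--     # Pass 1: class -> index of its first occurrence, in first-seen order.
--     firstIndex = {}
--     for i, c in enumerate(classesFaces):
--         if c not in firstIndex:
--             firstIndex[c] = i
--     galleryIdx = set(firstIndex.values())
--     # Pass 2: everything whose index is not a first occurrence is "rest".
--     restOfData = []
--     classesRestOfData = []
--     for i in range(len(classesFaces)):
--         if i not in galleryIdx:
--             restOfData.append(dataFaces[i])
--             classesRestOfData.append(classesFaces[i])
--     return [dataFaces[i] for i in firstIndex.values()], list(firstIndex.keys()), restOfData, classesRestOfData
-- ===== Notes on version B (the rewrite author's own statement) =====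
-- stated objective: alternative
-- what changed: A interleaves dict-building and rest-collection in one loop; B first builds a class->first-occurrence-index table in one pass, then filters the rest in a second pass over indices and reads the gallery off the table.
import Mathlib
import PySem

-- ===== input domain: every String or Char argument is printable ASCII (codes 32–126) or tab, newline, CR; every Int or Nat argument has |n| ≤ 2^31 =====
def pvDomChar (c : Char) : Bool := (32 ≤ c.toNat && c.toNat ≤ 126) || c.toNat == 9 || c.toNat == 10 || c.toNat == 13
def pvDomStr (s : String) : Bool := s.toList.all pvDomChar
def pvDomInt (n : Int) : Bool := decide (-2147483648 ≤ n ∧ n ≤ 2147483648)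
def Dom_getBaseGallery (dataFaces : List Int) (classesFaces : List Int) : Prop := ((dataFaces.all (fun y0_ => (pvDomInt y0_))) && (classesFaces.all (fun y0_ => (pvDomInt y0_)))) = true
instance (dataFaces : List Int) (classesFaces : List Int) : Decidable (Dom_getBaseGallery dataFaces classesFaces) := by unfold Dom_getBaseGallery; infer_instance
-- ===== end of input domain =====

-- B splits A's single interleaved loop into a first-occurrence-index table pass plus a filtering pass; return values proved equal whenever A returns (no speed claim).


-- ===== PORT A =====
-- one loop over d in range(len(classesFaces)): unseen class -> dict entry, seen class -> rest lists
def getBaseGallery (dataFaces : List Int) (classesFaces : List Int) : List Int × List Int × List Int × List Int :=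
  let st := (PySem.List.pyRange 0 (classesFaces.length : Int) 1).foldl
    (fun (st : PySem.Dict Int Int × List Int × List Int) d =>
      let currClass := PySem.List.pyGetD classesFaces d 0
      if ¬ st.1.contains currClass then
        (st.1.insert currClass (PySem.List.pyGetD dataFaces d 0), st.2.1, st.2.2)
      else
        (st.1, st.2.1 ++ [PySem.List.pyGetD dataFaces d 0], st.2.2 ++ [currClass]))
    (PySem.Dict.empty, [], [])
  (st.1.values, st.1.keys, st.2.1, st.2.2)

-- ===== PORT B =====
-- pass 1: class -> first-occurrence index; pass 2: filter non-first indices into the rest lists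
def getBaseGallery_alt (dataFaces : List Int) (classesFaces : List Int) : List Int × List Int × List Int × List Int :=
  let firstIndex := (PySem.List.enumerate classesFaces).foldl
    (fun (d : PySem.Dict Int Int) p => if ¬ d.contains p.2 then d.insert p.2 p.1 else d)
    PySem.Dict.empty
  let galleryIdx : PySem.Set Int := PySem.Set.ofList firstIndex.values
  let rest := (PySem.List.pyRange 0 (classesFaces.length : Int) 1).foldl
    (fun (acc : List Int × List Int) i =>
      if ¬ PySem.Set.contains galleryIdx i then
        (acc.1 ++ [PySem.List.pyGetD dataFaces i 0], acc.2 ++ [PySem.List.pyGetD classesFaces i 0])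
      else acc)
    ([], [])
  (firstIndex.values.map (fun i => PySem.List.pyGetD dataFaces i 0), firstIndex.keys, rest.1, rest.2)

-- ===== PRECONDITION & SPEC =====
-- A raises IndexError (dataFaces[d]) as soon as classesFaces is longer than dataFaces; exactly those inputs are excluded.
def Pre_getBaseGallery (dataFaces : List Int) (classesFaces : List Int) : Prop :=
  classesFaces.length ≤ dataFaces.length
instance (dataFaces : List Int) (classesFaces : List Int) : Decidable (Pre_getBaseGallery dataFaces classesFaces) := by unfold Pre_getBaseGallery; infer_instance

def pvWitness_getBaseGallery : List Int × List Int := ([10, 20, 30], [1, 2, 1])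

def Spec_getBaseGallery (dataFaces : List Int) (classesFaces : List Int) (out : List Int × List Int × List Int × List Int) : Prop := out = getBaseGallery_alt dataFaces classesFaces
instance (dataFaces : List Int) (classesFaces : List Int) (out : List Int × List Int × List Int × List Int) : Decidable (Spec_getBaseGallery dataFaces classesFaces out) := by unfold Spec_getBaseGallery; infer_instance

-- ===== CLAIM (what is proved, stated in full; the proofs are below) =====
def Claim_equal_getBaseGallery : Prop := ∀ (dataFaces : List Int) (classesFaces : List Int), Dom_getBaseGallery dataFaces classesFaces → Pre_getBaseGallery dataFaces classesFaces → Spec_getBaseGallery dataFaces classesFaces (getBaseGallery dataFaces classesFaces)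

-- ===== LEMMAS AND PROOFS =====

-- abbreviations local to the proof: the two loop bodies, over enumerate pairs
def pvStepE (E : PySem.Dict Int Int) (p : Int × Int) : PySem.Dict Int Int :=
  if ¬ E.contains p.2 then E.insert p.2 p.1 else E

def pvStepA (g : Int → Int) (st : PySem.Dict Int Int × List Int × List Int) (p : Int × Int) :
    PySem.Dict Int Int × List Int × List Int :=
  if ¬ st.1.contains p.2 then (st.1.insert p.2 (g p.1), st.2.1, st.2.2)
  else (st.1, st.2.1 ++ [g p.1], st.2.2 ++ [p.2])

-- A's dict is B's first-occurrence dict with each value pushed through g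
def pvMapD (g : Int → Int) (E : PySem.Dict Int Int) : PySem.Dict Int Int :=
  PySem.Dict.mk (E.items.map (fun q => (q.1, g q.2)))

lemma pvMapD_contains (g : Int → Int) (E : PySem.Dict Int Int) (c : Int) :
    (pvMapD g E).contains c = E.contains c := by
  obtain ⟨l⟩ := E
  simp [pvMapD, PySem.Dict.contains_mk, List.any_map, Function.comp_def]

lemma pvMapD_insert (g : Int → Int) (E : PySem.Dict Int Int) (k v : Int)
    (h : E.contains k = false) :
    (pvMapD g E).insert k (g v) = pvMapD g (E.insert k v) := by
  apply PySem.Dict.ext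
  have h' : (pvMapD g E).contains k = false := by rw [pvMapD_contains]; exact h
  rw [PySem.Dict.items_insert_of_not_contains _ _ h']
  rw [show pvMapD g (E.insert k v) = PySem.Dict.mk ((E.insert k v).items.map fun q => (q.1, g q.2)) from rfl,
      PySem.Dict.items_insert_of_not_contains _ _ h]
  simp [pvMapD]

-- values produced by the stepE fold stay inside the initial values plus the first components
lemma pvFoldE_values_subset (P : List (Int × Int)) (E : PySem.Dict Int Int) (v : Int)
    (hv : v ∈ (P.foldl pvStepE E).values) : v ∈ E.values ∨ v ∈ P.map Prod.fst := by
  induction P generalizing E with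
  | nil => exact Or.inl hv
  | cons p P ih =>
    rcases ih (pvStepE E p) hv with h | h
    · unfold pvStepE at h
      split at h
      · rcases PySem.Dict.mem_values_insert E p.2 p.1 v h with h | h
        · exact Or.inr (by simp [h])
        · exact Or.inl h
      · exact Or.inl h
    · exact Or.inr (List.mem_cons_of_mem _ h)

-- items survive the stepE fold
lemma pvFoldE_items_mono (P : List (Int × Int)) (E : PySem.Dict Int Int) (q : Int × Int)
    (hq : q ∈ E.items) : q ∈ (P.foldl pvStepE E).items := by
  induction P generalizing E with
  | nil => exact hq
  | cons p P ih =>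
    refine ih (pvStepE E p) ?_
    unfold pvStepE
    split
    · next h =>
      rw [PySem.Dict.items_insert_of_not_contains]
      · exact List.mem_append_left _ hq
      · simpa using h
    · exact hq

-- the main invariant
lemma pvMain (g : Int → Int) (P : List (Int × Int)) (E : PySem.Dict Int Int)
    (r c : List Int)
    (hnd : (P.map Prod.fst).Nodup)
    (hdisj : ∀ p ∈ P, p.1 ∉ E.values) :
    P.foldl (pvStepA g) (pvMapD g E, r, c) =
      (pvMapD g (P.foldl pvStepE E),
       r ++ (P.filter (fun p => ¬ p.1 ∈ (P.foldl pvStepE E).values)).map (fun p => g p.1),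
       c ++ (P.filter (fun p => ¬ p.1 ∈ (P.foldl pvStepE E).values)).map (fun p => p.2)) := by
  induction P generalizing E r c with
  | nil => simp
  | cons p P ih =>
    have hp : p.1 ∉ P.map Prod.fst := (List.nodup_cons.mp (by simpa using hnd)).1
    have hnd' : (P.map Prod.fst).Nodup := (List.nodup_cons.mp (by simpa using hnd)).2
    by_cases h : E.contains p.2 = true
    · have hstepE : pvStepE E p = E := by simp [pvStepE, h]
      have hstepA : pvStepA g (pvMapD g E, r, c) p = (pvMapD g E, r ++ [g p.1], c ++ [p.2]) := by
        simp [pvStepA, pvMapD_contains, h]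
      have hpE1 : p.1 ∉ (P.foldl pvStepE E).values := by
        intro hmem
        rcases pvFoldE_values_subset P E p.1 hmem with h' | h'
        · exact hdisj p (List.mem_cons_self) h'
        · exact hp h'
      simp only [List.foldl_cons, hstepE, hstepA]
      rw [ih E (r ++ [g p.1]) (c ++ [p.2]) hnd'
          (fun q hq => hdisj q (List.mem_cons_of_mem _ hq))]
      simp [hpE1, List.append_assoc]
    · have hf : E.contains p.2 = false := by simpa using h
      have hstepE : pvStepE E p = E.insert p.2 p.1 := by simp [pvStepE, hf]
      have hstepA : pvStepA g (pvMapD g E, r, c) p = (pvMapD g (E.insert p.2 p.1), r, c) := by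
        simp [pvStepA, pvMapD_contains, hf, pvMapD_insert g E p.2 p.1 hf]
      have hvins : (E.insert p.2 p.1).values = E.values ++ [p.1] := by
        show ((E.insert p.2 p.1).items.map Prod.snd) = _
        rw [PySem.Dict.items_insert_of_not_contains _ _ hf]
        simp [PySem.Dict.values]
      have hdisj' : ∀ q ∈ P, q.1 ∉ (E.insert p.2 p.1).values := by
        intro q hq hmem
        rw [hvins] at hmem
        rcases List.mem_append.mp hmem with h' | h'
        · exact hdisj q (List.mem_cons_of_mem _ hq) h'
        · have : q.1 = p.1 := by simpa using h'
          exact hp (this ▸ List.mem_map_of_mem hq)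
      have hpE1 : p.1 ∈ (P.foldl pvStepE (E.insert p.2 p.1)).values := by
        have hit : (p.2, p.1) ∈ (E.insert p.2 p.1).items := by
          rw [PySem.Dict.items_insert_of_not_contains _ _ hf]; simp
        have := pvFoldE_items_mono P (E.insert p.2 p.1) (p.2, p.1) hit
        exact List.mem_map_of_mem (f := Prod.snd) this
      simp only [List.foldl_cons, hstepE, hstepA]
      rw [ih (E.insert p.2 p.1) r c hnd' hdisj']
      simp [hpE1]

-- assemble A's final tuple from its loop state
def pvOut (st : PySem.Dict Int Int × List Int × List Int) : List Int × List Int × List Int × List Int :=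
  (st.1.values, st.1.keys, st.2.1, st.2.2)

-- B's first-occurrence dict
def pvE1 (cs : List Int) : PySem.Dict Int Int :=
  (PySem.List.enumerate cs).foldl pvStepE PySem.Dict.empty

-- B's second-pass body
def pvStepB (ds : List Int) (E : PySem.Dict Int Int) (acc : List Int × List Int) (p : Int × Int) :
    List Int × List Int :=
  if ¬ PySem.Set.contains (PySem.Set.ofList E.values) p.1 then
    (acc.1 ++ [PySem.List.pyGetD ds p.1 0], acc.2 ++ [p.2])
  else acc

-- A's loop, rephrased as a fold of pvStepA over enumerate(classesFaces)
lemma pvA_eq (ds cs : List Int) : getBaseGallery ds cs =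
    pvOut ((PySem.List.enumerate cs).foldl (pvStepA (fun i => PySem.List.pyGetD ds i 0))
      (PySem.Dict.empty, [], [])) := by
  unfold getBaseGallery
  rw [PySem.List.enumerate_eq_map_pyRange cs 0, List.foldl_map]
  rfl

-- B, rephrased as folds over enumerate(classesFaces)
lemma pvB_eq (ds cs : List Int) : getBaseGallery_alt ds cs =
    ((pvE1 cs).values.map (fun i => PySem.List.pyGetD ds i 0), (pvE1 cs).keys,
     ((PySem.List.enumerate cs).foldl (pvStepB ds (pvE1 cs)) ([], [])).1,
     ((PySem.List.enumerate cs).foldl (pvStepB ds (pvE1 cs)) ([], [])).2) := by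
  unfold getBaseGallery_alt pvE1 pvStepB
  rw [PySem.List.enumerate_eq_map_pyRange cs 0]
  simp only [List.foldl_map]
  rfl

-- B's second pass is an append of the filtered, mapped pairs
lemma pvPass2 (ds : List Int) (E : PySem.Dict Int Int) (P : List (Int × Int)) (r c : List Int) :
    P.foldl (pvStepB ds E) (r, c) =
      (r ++ (P.filter (fun p => ¬ p.1 ∈ E.values)).map (fun p => PySem.List.pyGetD ds p.1 0),
       c ++ (P.filter (fun p => ¬ p.1 ∈ E.values)).map (fun p => p.2)) := by
  induction P generalizing r c with
  | nil => simp
  | cons p P ih =>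
    by_cases h : p.1 ∈ E.values
    · rw [List.foldl_cons, show pvStepB ds E (r, c) p = (r, c) by simp [pvStepB]; exact h, ih]
      simp [h]
    · rw [List.foldl_cons,
        show pvStepB ds E (r, c) p = (r ++ [PySem.List.pyGetD ds p.1 0], c ++ [p.2]) by
          simp [pvStepB]; exact h, ih]
      simp [h, List.append_assoc]

-- ===== VERDICT (by name: the statement is the Claim_ definition above) =====
theorem getBaseGallery_spec : Claim_equal_getBaseGallery := by
  intro ds cs _ _
  show getBaseGallery ds cs = getBaseGallery_alt ds cs
  rw [pvA_eq, pvB_eq]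
  have hnd : ((PySem.List.enumerate cs).map Prod.fst).Nodup := by
    have h := PySem.List.pairwise_lt_enumerate cs (0 : Int)
    exact List.pairwise_map.mpr (h.imp (fun hlt => ne_of_lt hlt))
  have e0 : pvMapD (fun i => PySem.List.pyGetD ds i 0) PySem.Dict.empty = PySem.Dict.empty := rfl
  have hmain := pvMain (fun i => PySem.List.pyGetD ds i 0) (PySem.List.enumerate cs)
    PySem.Dict.empty [] [] hnd (by intro p _ hm; simp [PySem.Dict.values, PySem.Dict.empty] at hm)
  rw [e0] at hmain
  rw [hmain, pvPass2 ds (pvE1 cs) (PySem.List.enumerate cs) [] []]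
  unfold pvOut pvE1
  refine Prod.ext ?_ (Prod.ext ?_ (Prod.ext ?_ ?_))
  · simp [pvMapD, PySem.Dict.values, List.map_map, Function.comp_def]
  · simp [pvMapD, PySem.Dict.keys, List.map_map, Function.comp_def]
  · simp
  · simp
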